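-- pv_equiv track=rewrite | github.com/ErikP0/arithmetic-circuits-for-spn-primitives | MP-SPDZ code/photon.py | cembed8
-- ===== SOURCE A (Python) =====
-- import functools
-- import operator
--
-- CEMBED_POWERS8 = [1 << 5, 1 << 10, 1 << 15, 1 << 20, 1 << 25, 1 << 30, 1 << 35]
--
-- def cembed8(x):
--     in_bytes = [(x >> i) & 0x1 for i in range(8)]
--     out_bytes = [None] * 8
--     out_bytes[0] = functools.reduce(operator.xor, in_bytes[0:8])
--     out_bytes[1] = functools.reduce(operator.xor, (in_bytes[idx] for idx in range(1, 8, 2)))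
--     out_bytes[2] = in_bytes[2] ^ in_bytes[3] ^ in_bytes[6] ^ in_bytes[7]
--     out_bytes[3] = in_bytes[3] ^ in_bytes[7]
--     out_bytes[4] = in_bytes[4] ^ in_bytes[5] ^ in_bytes[6] ^ in_bytes[7]
--     out_bytes[5] = in_bytes[5] ^ in_bytes[7]
--     out_bytes[6] = in_bytes[6] ^ in_bytes[7]
--     out_bytes[7] = in_bytes[7]
--     return out_bytes[0] + sum(p*y for p,y in zip(CEMBED_POWERS8, out_bytes[1:]))
-- ===== SOURCE B (Python) =====
-- def cembed8(x):
--     # mask i selects the input bits that are XORed into output digit i;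
--     # parity of popcount(x & mask) is that digit, weighted by 32**i.
--     masks = (0xFF, 0xAA, 0xCC, 0x88, 0xF0, 0xA0, 0xC0, 0x80)
--     weights = (1, 1 << 5, 1 << 10, 1 << 15, 1 << 20, 1 << 25, 1 << 30, 1 << 35)
--     acc = 0
--     for mask, weight in zip(masks, weights):
--         if bin(x & mask).count("1") & 1:
--             acc += weight
--     return acc
-- ===== Notes on version B (the rewrite author's own statement) =====
-- stated objective: alternative
-- what changed: Replaces the in_bytes/out_bytes lists and per-output XOR formulas by a single loop over a (mask, weight) table, adding weight when popcount(x & mask) is odd.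
import Mathlib
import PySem

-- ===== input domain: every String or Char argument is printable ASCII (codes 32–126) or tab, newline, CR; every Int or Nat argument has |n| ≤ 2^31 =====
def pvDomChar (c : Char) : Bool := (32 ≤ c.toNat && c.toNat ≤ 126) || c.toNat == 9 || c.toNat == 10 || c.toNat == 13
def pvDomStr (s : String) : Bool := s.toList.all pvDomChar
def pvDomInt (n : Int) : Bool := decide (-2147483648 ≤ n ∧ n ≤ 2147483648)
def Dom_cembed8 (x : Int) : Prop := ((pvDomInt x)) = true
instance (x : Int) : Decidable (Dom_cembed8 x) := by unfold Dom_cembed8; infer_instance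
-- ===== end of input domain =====

-- ===== PORT A =====
-- One honest line: B replaces A's in_bytes/out_bytes lists and per-output XOR formulas
-- by a single fold over a (mask, weight) table using popcount parity; same cost, different structure.
def CEMBED_POWERS8 : List Int := [1 <<< 5, 1 <<< 10, 1 <<< 15, 1 <<< 20, 1 <<< 25, 1 <<< 30, 1 <<< 35]

-- functools.reduce(operator.xor, l) on the (always non-empty, fixed-length) lists A builds:
-- reduce(f, a::t) = foldl f a t; headD 0 / tail match that on the non-empty lists reached here.
def pyReduceXor (l : List Int) : Int := l.tail.foldl PySem.Int.bxor (l.headD 0)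

def cembed8 (x : Int) : Int :=
  let in_bytes : List Int := (PySem.List.pyRange 0 8 1).map (fun i => PySem.Int.band (x >>> i.toNat) 1)
  -- in_bytes[idx]: index always in range (0..7), so pyGetD's default is never used
  let ib : Int → Int := fun idx => PySem.List.pyGetD in_bytes idx 0
  let out0 := pyReduceXor (PySem.List.slice in_bytes (some 0) (some 8))
  let out1 := pyReduceXor ((PySem.List.pyRange 1 8 2).map ib)
  let out2 := PySem.Int.bxor (PySem.Int.bxor (PySem.Int.bxor (ib 2) (ib 3)) (ib 6)) (ib 7)
  let out3 := PySem.Int.bxor (ib 3) (ib 7)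
  let out4 := PySem.Int.bxor (PySem.Int.bxor (PySem.Int.bxor (ib 4) (ib 5)) (ib 6)) (ib 7)
  let out5 := PySem.Int.bxor (ib 5) (ib 7)
  let out6 := PySem.Int.bxor (ib 6) (ib 7)
  let out7 := ib 7
  let out_bytes : List Int := [out0, out1, out2, out3, out4, out5, out6, out7]
  out0 + ((CEMBED_POWERS8.zip (PySem.List.slice out_bytes (some 1) none)).foldl
            (fun acc py => acc + py.1 * py.2) 0)

-- ===== PORT B =====
-- bin(n).count("1") for the non-negative n = x & mask is n.bit_count() = PySem.Int.bitCount n.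
def cembed8_alt (x : Int) : Int :=
  let table : List (Int × Int) :=
    (List.zip [0xFF, 0xAA, 0xCC, 0x88, 0xF0, 0xA0, 0xC0, 0x80]
              [1, 1 <<< 5, 1 <<< 10, 1 <<< 15, 1 <<< 20, 1 <<< 25, 1 <<< 30, 1 <<< 35])
  table.foldl
    (fun acc mw =>
      if PySem.Int.bitCount (PySem.Int.band x mw.1) &&& 1 = 1 then acc + mw.2 else acc) 0

-- ===== PRECONDITION & SPEC =====
def Spec_cembed8 (x : Int) (out : Int) : Prop := out = cembed8_alt x
instance (x : Int) (out : Int) : Decidable (Spec_cembed8 x out) := by unfold Spec_cembed8; infer_instance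

-- ===== CLAIM (what is proved, stated in full; the proofs are below) =====
def Claim_equal_cembed8 : Prop := ∀ (x : Int), Dom_cembed8 x → Spec_cembed8 x (cembed8 x)

-- ===== LEMMAS AND PROOFS =====
theorem nat_and_low (n m : Nat) (h : m < 256) : n &&& m = (n % 256) &&& m := by
  apply Nat.eq_of_testBit_eq
  intro i
  rw [Nat.testBit_and, Nat.testBit_and, show (256:Nat) = 2^8 from rfl, Nat.testBit_mod_two_pow]
  by_cases hi : i < 8
  · simp [hi]
  · have hm : m.testBit i = false :=
      Nat.testBit_eq_false_of_lt (lt_of_lt_of_le h (Nat.pow_le_pow_right (by norm_num : 1 ≤ 2) (by omega : 8 ≤ i)))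
    simp [hi, hm]
set_option maxRecDepth 10000 in
theorem byte_sub_and : ∀ k < 256, ∀ m ∈ ([255,170,204,136,240,160,192,128] : List Nat),
    m - (m &&& k) = (255 - k) &&& m := by decide
theorem band_low (x : Int) (m : Nat) (hm : m ∈ ([255,170,204,136,240,160,192,128] : List Nat)) :
    PySem.Int.band x ↑m = PySem.Int.band (x % 256) ↑m := by
  have hm256 : m < 256 := by fin_cases hm <;> norm_num
  have hx256 : 0 ≤ x % 256 := Int.emod_nonneg x (by norm_num)
  have hmn : (0:Int) ≤ (m:Int) := Int.natCast_nonneg m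
  unfold PySem.Int.band
  by_cases hx : 0 ≤ x
  · rw [if_pos hx, if_pos hmn, if_pos hx256, if_pos hmn]
    have h1 : (x % 256).toNat = x.toNat % 256 := by omega
    rw [Int.toNat_natCast, h1, ← nat_and_low _ _ hm256]
  · rw [if_neg hx, if_pos hmn, if_pos hx256, if_pos hmn]
    have h1 : (x % 256).toNat = 255 - (-x-1).toNat % 256 := by omega
    rw [Int.toNat_natCast, h1]
    rw [show m &&& (-x-1).toNat = m &&& ((-x-1).toNat % 256) by
      rw [Nat.and_comm, nat_and_low _ _ hm256, Nat.and_comm]]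
    rw [byte_sub_and _ (by omega) _ hm]
theorem bit_low (x : Int) (i : Nat) (hi : i < 8) :
    PySem.Int.band (x >>> (i:Int)) 1 = PySem.Int.band ((x % 256) >>> (i:Int)) 1 := by
  rw [PySem.Int.band_one, PySem.Int.band_one]
  unfold PySem.Int.mod
  rw [Int.fmod_eq_emod, Int.fmod_eq_emod, Int.shiftRight_natCast_right, Int.shiftRight_natCast_right,
    Int.shiftRight_eq_div_pow, Int.shiftRight_eq_div_pow]
  push_cast
  interval_cases i <;> norm_num <;> omega

theorem lowA (x : Int) : cembed8 x = cembed8 (x % 256) := by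
  have h0 := bit_low x 0 (by omega)
  have h1 := bit_low x 1 (by omega)
  have h2 := bit_low x 2 (by omega)
  have h3 := bit_low x 3 (by omega)
  have h4 := bit_low x 4 (by omega)
  have h5 := bit_low x 5 (by omega)
  have h6 := bit_low x 6 (by omega)
  have h7 := bit_low x 7 (by omega)
  push_cast at h0 h1 h2 h3 h4 h5 h6 h7
  simp only [cembed8, pyReduceXor,
    show PySem.List.pyRange 0 8 1 = [0,1,2,3,4,5,6,7] from by decide,
    show PySem.List.pyRange 1 8 2 = [1,3,5,7] from by decide,
    List.map_cons, List.map_nil, PySem.List.pyGetD, PySem.List.slice]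
  norm_num
  simp only [h0, h1, h2, h3, h4, h5, h6, h7]

theorem lowB (x : Int) : cembed8_alt x = cembed8_alt (x % 256) := by
  have h255 := band_low x 255 (by norm_num)
  have h170 := band_low x 170 (by norm_num)
  have h204 := band_low x 204 (by norm_num)
  have h136 := band_low x 136 (by norm_num)
  have h240 := band_low x 240 (by norm_num)
  have h160 := band_low x 160 (by norm_num)
  have h192 := band_low x 192 (by norm_num)
  have h128 := band_low x 128 (by norm_num)
  push_cast at h255 h170 h204 h136 h240 h160 h192 h128
  simp only [cembed8_alt, List.zip, List.zipWith, List.foldl_cons, List.foldl_nil]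
  norm_num
  rw [h255, h170, h204, h136, h240, h160, h192, h128]

set_option maxRecDepth 10000 in
set_option maxHeartbeats 1000000 in
theorem ball : ∀ n : Nat, n < 256 → cembed8 (n : Int) = cembed8_alt (n : Int) := by decide

-- ===== VERDICT (by name: the statement is the Claim_ definition above) =====
theorem cembed8_spec : Claim_equal_cembed8 := by
  intro x _
  unfold Spec_cembed8
  rw [lowA x, lowB x]
  rw [show x % 256 = ((x % 256).toNat : Int) from by omega]
  exact ball _ (by omega)
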